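-- pv_equiv track=rewrite | github.com/kd02109/CodingTest | SWEA/D3/14413. 격자판 칠하기/격자판 칠하기.py | solution
-- ===== SOURCE A (Python) =====
-- def solution(board:list, row:int, col:int):
--     # 0:#이 홀수, 1 :#이 짝수, 2:.이 홀수, 3:.이 짝수
--     check = [0,0,0,0]
--     for i in range(row):
--         for j in range(col):
--             if board[i][j] == "#":
--                 if (i+j) % 2 == 0:
--                     check[1] = 1
--                 else:
--                     check[0] = 1
--             if board[i][j] == ".":
--                 if (i+j) % 2 == 0:
--                     check[3] = 1
--                 else:
--                     check[2] = 1
--     if (check[0] and check[1]) or (check[0] and check[2]) or (check[1] and check[3]) or (check[2] and check[3]):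
--         return "impossible"
--     else:
--         return "possible"
-- ===== SOURCE B (Python) =====
-- def solution(board: list, row: int, col: int):
--     # Template matching: the grid is paintable iff it matches one of the two fixed
--     # checkerboard templates ('#' on cells of parity t, '.' on the others), t = 0 or 1.
--     def fits(t):
--         return all(
--             (((i + j) % 2 == t) if board[i][j] == "#" else
--              ((i + j) % 2 != t) if board[i][j] == "." else True)
--             for i in range(row) for j in range(col))
--     return "possible" if fits(0) or fits(1) else "impossible"
-- ===== Notes on version B (the rewrite author's own statement) =====
-- stated objective: alternative
-- what changed: B decides by template matching: instead of accumulating four presence flags over one scan, it checks the grid against each of the two fixed checkerboard templates ('#' on even-parity cells or on odd-parity cells) in two independent stateless verification passes and answers 'possible' iff one template fits.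
import Mathlib
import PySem

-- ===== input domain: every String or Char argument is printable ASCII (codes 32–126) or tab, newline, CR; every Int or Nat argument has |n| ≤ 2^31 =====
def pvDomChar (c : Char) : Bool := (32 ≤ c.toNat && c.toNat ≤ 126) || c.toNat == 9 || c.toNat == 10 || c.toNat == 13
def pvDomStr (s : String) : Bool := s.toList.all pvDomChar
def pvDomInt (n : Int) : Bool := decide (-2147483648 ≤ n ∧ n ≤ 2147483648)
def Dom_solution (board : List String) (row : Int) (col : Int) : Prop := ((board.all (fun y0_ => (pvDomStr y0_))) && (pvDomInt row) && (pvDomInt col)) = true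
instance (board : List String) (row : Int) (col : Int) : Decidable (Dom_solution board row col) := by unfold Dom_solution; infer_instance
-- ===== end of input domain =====

-- B replaces A's four-flag accumulation by stateless verification against the two fixed
-- checkerboard templates (alternative algorithm, same asymptotic cost).


-- ===== PORT A =====
def solution (board : List String) (row : Int) (col : Int) : String :=
  let check : List Int := [0, 0, 0, 0]
  let check := (PySem.List.pyRange 0 row 1).foldl (fun check i =>
    (PySem.List.pyRange 0 col 1).foldl (fun check j =>
      match (PySem.List.pyGet? board i).bind (fun line => PySem.Str.pyGet? line j) with
      | none => check   -- Python raises IndexError here; excluded by Pre_solution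
      | some c =>
        let check := if c = '#' then
            (if PySem.Int.mod (i + j) 2 = 0 then check.set 1 1 else check.set 0 1)
          else check
        let check := if c = '.' then
            (if PySem.Int.mod (i + j) 2 = 0 then check.set 3 1 else check.set 2 1)
          else check
        check) check) check
  if ((check.getD 0 0 ≠ 0 ∧ check.getD 1 0 ≠ 0) ∨ (check.getD 0 0 ≠ 0 ∧ check.getD 2 0 ≠ 0) ∨
      (check.getD 1 0 ≠ 0 ∧ check.getD 3 0 ≠ 0) ∨ (check.getD 2 0 ≠ 0 ∧ check.getD 3 0 ≠ 0))
  then "impossible" else "possible"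

-- ===== PORT B =====
-- fits t = Python's all(...) generator: every visited cell is compatible with the template
-- that puts '#' on cells of parity t (List.all has the same early-exit semantics as all()).
def pvFits (board : List String) (row : Int) (col : Int) (t : Int) : Bool :=
  (PySem.List.pyRange 0 row 1).all (fun i =>
    (PySem.List.pyRange 0 col 1).all (fun j =>
      match (PySem.List.pyGet? board i).bind (fun line => PySem.Str.pyGet? line j) with
      | none => true   -- Python raises IndexError here; excluded by Pre_solution
      | some ch =>
        if ch = '#' then PySem.Int.mod (i + j) 2 == t
        else if ch = '.' then PySem.Int.mod (i + j) 2 != t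
        else true))

def solution_alt (board : List String) (row : Int) (col : Int) : String :=
  if pvFits board row col 0 || pvFits board row col 1 then "possible" else "impossible"

-- ===== PRECONDITION & SPEC =====
-- Pre_ excludes exactly the inputs on which the Python raises IndexError: some visited cell
-- board[i][j] (0 ≤ i < row, 0 ≤ j < col) is out of range.
def Pre_solution (board : List String) (row : Int) (col : Int) : Prop :=
  col ≤ 0 ∨ row ≤ 0 ∨
    (row ≤ (board.length : Int) ∧ ∀ s ∈ board.take row.toNat, col ≤ (s.toList.length : Int))
instance (board : List String) (row : Int) (col : Int) : Decidable (Pre_solution board row col) := by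
  unfold Pre_solution; infer_instance
def pvWitness_solution : List String × Int × Int := (["#.", ".#"], 2, 2)
def Spec_solution (board : List String) (row : Int) (col : Int) (out : String) : Prop := out = solution_alt board row col
instance (board : List String) (row : Int) (col : Int) (out : String) : Decidable (Spec_solution board row col out) := by unfold Spec_solution; infer_instance

-- ===== CLAIM (what is proved, stated in full; the proofs are below) =====
def Claim_equal_solution : Prop := ∀ (board : List String) (row : Int) (col : Int), Dom_solution board row col → Pre_solution board row col → Spec_solution board row col (solution board row col)

-- ===== LEMMAS AND PROOFS =====

def pvFlag (x : Int) : Bool := x != 0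

-- coupling invariant: B's two template-verdicts-so-far as a function of A's flag list
-- (flag 0: '#' at odd, 1: '#' at even, 2: '.' at odd, 3: '.' at even;
--  template 0 = '#' on even cells is violated exactly by flags 0 and 3,
--  template 1 = '#' on odd cells is violated exactly by flags 1 and 2)
def pvInv (check : List Int) (st : Bool × Bool) : Prop :=
  check.length = 4 ∧
    st.1 = (!pvFlag (check.getD 0 0) && !pvFlag (check.getD 3 0)) ∧
    st.2 = (!pvFlag (check.getD 1 0) && !pvFlag (check.getD 2 0))

-- per-cell step functions: A's inline step, and B's per-cell compatibility check
def pvACell (board : List String) (i j : Int) (check : List Int) : List Int :=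
  match (PySem.List.pyGet? board i).bind (fun line => PySem.Str.pyGet? line j) with
  | none => check
  | some c =>
    let check := if c = '#' then
        (if PySem.Int.mod (i + j) 2 = 0 then check.set 1 1 else check.set 0 1)
      else check
    let check := if c = '.' then
        (if PySem.Int.mod (i + j) 2 = 0 then check.set 3 1 else check.set 2 1)
      else check
    check

def pvBOk (board : List String) (i j t : Int) : Bool :=
  match (PySem.List.pyGet? board i).bind (fun line => PySem.Str.pyGet? line j) with
  | none => true
  | some ch =>
    if ch = '#' then PySem.Int.mod (i + j) 2 == t
    else if ch = '.' then PySem.Int.mod (i + j) 2 != t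
    else true

lemma pv_foldl_rel {α β γ : Type} (R : α → β → Prop) (f : α → γ → α) (g : β → γ → β)
    (l : List γ) (hstep : ∀ a b x, R a b → R (f a x) (g b x)) :
    ∀ a b, R a b → R (l.foldl f a) (l.foldl g b) := by
  induction l with
  | nil => intro a b h; exact h
  | cons x xs ih => intro a b h; exact ih _ _ (hstep a b x h)

lemma pv_all_eq_foldl {γ : Type} (l : List γ) (p : γ → Bool) :
    ∀ b : Bool, l.foldl (fun b x => b && p x) b = (b && l.all p) := by
  induction l with
  | nil => intro b; simp
  | cons x xs ih => intro b; simp [ih, Bool.and_assoc]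

lemma pv_foldl_pair {α β γ : Type} (f : α → γ → α) (g : β → γ → β) (l : List γ) :
    ∀ (a : α) (b : β),
      l.foldl (fun st x => (f st.1 x, g st.2 x)) (a, b) = (l.foldl f a, l.foldl g b) := by
  induction l with
  | nil => intro a b; rfl
  | cons x xs ih => intro a b; exact ih _ _

lemma pv_len4 (check : List Int) (h : check.length = 4) :
    ∃ a b c d : Int, check = [a, b, c, d] := by
  match check, h with
  | [a, b, c, d], _ => exact ⟨a, b, c, d, rfl⟩

lemma pv_cell_pres (board : List String) (i j : Int) (check : List Int)
    (st : Bool × Bool) (h : pvInv check st) :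
    pvInv (pvACell board i j check) (st.1 && pvBOk board i j 0, st.2 && pvBOk board i j 1) := by
  obtain ⟨hlen, h0, h1⟩ := h
  obtain ⟨a, b, c', d, rfl⟩ := pv_len4 check hlen
  unfold pvACell pvBOk
  cases hcell : (PySem.List.pyGet? board i).bind (fun line => PySem.Str.pyGet? line j) with
  | none => exact ⟨rfl, by simp [h0], by simp [h1]⟩
  | some ch =>
    have hp2 : PySem.Int.mod (i + j) 2 = 0 ∨ PySem.Int.mod (i + j) 2 = 1 := by
      have hq0 := PySem.Int.mod_nonneg (i + j) (b := 2) (by norm_num)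
      have hq1 := PySem.Int.mod_lt (i + j) (b := 2) (by norm_num)
      omega
    refine ⟨?_, ?_, ?_⟩ <;>
      rcases hp2 with hp | hp <;>
      rcases Decidable.em (ch = '#') with hch | hch <;>
      rcases Decidable.em (ch = '.') with hcd | hcd <;>
      first
        | exact absurd (hch ▸ hcd) (by decide)
        | (simp only [hp]
           simp [hch, hcd, h0, h1, pvFlag, List.set, Bool.and_comm])

def pvAFold (board : List String) (row : Int) (col : Int) : List Int :=
  (PySem.List.pyRange 0 row 1).foldl (fun check i =>
    (PySem.List.pyRange 0 col 1).foldl (fun check j => pvACell board i j check) check)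
    [0, 0, 0, 0]

-- B's two template passes, bundled as one paired fold (for the coupling with A's single fold)
def pvBFold (board : List String) (row : Int) (col : Int) : Bool × Bool :=
  (PySem.List.pyRange 0 row 1).foldl (fun st i =>
    (PySem.List.pyRange 0 col 1).foldl
      (fun st j => (st.1 && pvBOk board i j 0, st.2 && pvBOk board i j 1)) st)
    (true, true)

lemma pv_nested_all {γ δ : Type} (rows : List γ) (cols : List δ) (p : γ → δ → Bool) :
    ∀ b : Bool,
      rows.foldl (fun b i => cols.foldl (fun b j => b && p i j) b) b
        = (b && rows.all (fun i => cols.all (p i))) := by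
  induction rows with
  | nil => intro b; simp
  | cons x xs ih =>
    intro b
    simp only [List.foldl_cons, List.all_cons]
    rw [pv_all_eq_foldl, ih, Bool.and_assoc]

lemma pvBFold_eq_fits (board : List String) (row col : Int) :
    pvBFold board row col = (pvFits board row col 0, pvFits board row col 1) := by
  unfold pvBFold pvFits
  have hin : ∀ (i : Int) (st : Bool × Bool),
      (PySem.List.pyRange 0 col 1).foldl
        (fun st j => (st.1 && pvBOk board i j 0, st.2 && pvBOk board i j 1)) st
      = ((PySem.List.pyRange 0 col 1).foldl (fun b j => b && pvBOk board i j 0) st.1,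
         (PySem.List.pyRange 0 col 1).foldl (fun b j => b && pvBOk board i j 1) st.2) := by
    intro i st
    obtain ⟨a, b⟩ := st
    exact pv_foldl_pair (fun b j => b && pvBOk board i j 0)
      (fun b j => b && pvBOk board i j 1) (PySem.List.pyRange 0 col 1) a b
  simp only [hin]
  rw [pv_foldl_pair
      (fun b i => (PySem.List.pyRange 0 col 1).foldl (fun b j => b && pvBOk board i j 0) b)
      (fun b i => (PySem.List.pyRange 0 col 1).foldl (fun b j => b && pvBOk board i j 1) b)]
  rw [pv_nested_all, pv_nested_all]
  simp [pvBOk]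

theorem solution_spec_aux (board : List String) (row col : Int) :
    solution board row col = solution_alt board row col := by
  have hInv : pvInv (pvAFold board row col) (pvBFold board row col) := by
    unfold pvAFold pvBFold
    apply pv_foldl_rel pvInv _ _ _ ?_ _ _ ?_
    · intro a b i hab
      exact pv_foldl_rel pvInv _ _ _ (fun a b j h => pv_cell_pres board i j a b h) a b hab
    · exact ⟨rfl, rfl, rfl⟩
  obtain ⟨hlen, h0, h1⟩ := hInv
  rw [pvBFold_eq_fits] at h0 h1
  obtain ⟨a, b, c', d, heq⟩ := pv_len4 _ hlen
  have hA : solution board row col =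
      (if ((pvAFold board row col).getD 0 0 ≠ 0 ∧ (pvAFold board row col).getD 1 0 ≠ 0) ∨
          ((pvAFold board row col).getD 0 0 ≠ 0 ∧ (pvAFold board row col).getD 2 0 ≠ 0) ∨
          ((pvAFold board row col).getD 1 0 ≠ 0 ∧ (pvAFold board row col).getD 3 0 ≠ 0) ∨
          ((pvAFold board row col).getD 2 0 ≠ 0 ∧ (pvAFold board row col).getD 3 0 ≠ 0)
       then "impossible" else "possible") := rfl
  have hB : solution_alt board row col =
      (if pvFits board row col 0 || pvFits board row col 1 then "possible"
       else "impossible") := rfl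
  dsimp only at h0 h1
  rw [hA, hB, h0, h1, heq]
  by_cases ha : a = 0 <;> by_cases hb : b = 0 <;> by_cases hc : c' = 0 <;> by_cases hd : d = 0 <;>
    simp [pvFlag, ha, hb, hc, hd]

-- ===== VERDICT (by name: the statement is the Claim_ definition above) =====
theorem solution_spec : Claim_equal_solution := by
  intro board row col _ _
  unfold Spec_solution
  exact solution_spec_aux board row col
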